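-- pv_equiv track=rewrite | github.com/moazhassan751/respiratory-abnormality-detection-physiological-signals | bidmc-ppg-and-respiration-dataset-1.0.0/main.py | parse_demographics
-- ===== SOURCE A (Python) =====
-- def parse_demographics(header_comments):
--     """Extract age, sex, location from header comments"""
--     demographics = {'age': None, 'sex': None, 'location': None}
--
--     for comment in header_comments:
--         if '<age>:' in comment:
--             try:
--                 age_str = comment.split('<age>:')[1].split('<')[0].strip()
--                 demographics['age'] = int(age_str)
--             except:
--                 pass
--         if '<sex>:' in comment:
--             try:
--                 demographics['sex'] = comment.split('<sex>:')[1].split('<')[0].strip()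
--             except:
--                 pass
--         if '<location>:' in comment:
--             try:
--                 demographics['location'] = comment.split('<location>:')[1].split('<')[0].strip()
--             except:
--                 pass
--
--     return demographics
-- ===== SOURCE B (Python) =====
-- def parse_demographics(header_comments):
--     """Extract age, sex, location from header comments"""
--     def extract(tag, convert):
--         result = None
--         for comment in header_comments:
--             if tag in comment:
--                 try:
--                     result = convert(comment.split(tag)[1].split('<')[0].strip())
--                 except Exception:
--                     pass
--         return result
--     return {'age': extract('<age>:', int),
--             'sex': extract('<sex>:', str),
--             'location': extract('<location>:', str)}
-- ===== Notes on version B (the rewrite author's own statement) =====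
-- stated objective: alternative
-- what changed: A's single pass that mutates a three-key dict field-by-field is replaced by a generic per-field accumulator helper extract(tag, convert) run once per field (three independent passes, last successful conversion wins), and the dict is built directly from the three results.
import Mathlib
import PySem

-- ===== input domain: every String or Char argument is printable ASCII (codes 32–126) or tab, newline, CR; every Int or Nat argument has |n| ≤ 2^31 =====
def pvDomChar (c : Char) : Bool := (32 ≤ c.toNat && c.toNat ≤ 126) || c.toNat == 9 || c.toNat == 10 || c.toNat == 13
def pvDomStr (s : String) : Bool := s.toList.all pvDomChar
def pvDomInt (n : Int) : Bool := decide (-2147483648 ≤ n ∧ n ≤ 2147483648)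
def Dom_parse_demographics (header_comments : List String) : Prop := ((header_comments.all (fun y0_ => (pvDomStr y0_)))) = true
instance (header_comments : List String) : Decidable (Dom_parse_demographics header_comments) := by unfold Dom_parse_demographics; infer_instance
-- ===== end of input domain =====

-- B replaces A's single pass mutating a three-key dict with a generic per-field
-- accumulator helper (`extract(tag, convert)`, one pass per field, last successful
-- conversion wins) and builds the dict directly from the three results (objective:
-- alternative decomposition; same asymptotic cost).  Both Pythons are total; in
-- both ports the parsed int age is rendered as its decimal string, the declared
-- Option String value type.

-- shared by both ports: str.split(sep) for a NONEMPTY literal sep — PySem.Str.split?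
-- is none exactly when sep = "", which never happens here, so getD [] is exact.
def pvSplit (s sep : String) : List String := (PySem.Str.split? s sep).getD []

-- ===== PORT A =====
-- the three `if '<tag>:' in comment: try … except: pass` blocks of A's loop body,
-- one helper each, applied in order by pvStepA.  `comment.split(tag)[1]` is
-- PySem.List.pyGet? … 1 (the `none` = IndexError branch falls to the bare
-- `except: pass`, i.e. keeps d); `.split('<')[0]` always exists (split returns a
-- nonempty list), ported as headD "".
def pvAgeLine (d : PySem.Dict String (Option String)) (comment : String) :
    PySem.Dict String (Option String) :=
  if PySem.Str.isIn "<age>:" comment then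
    match PySem.List.pyGet? (pvSplit comment "<age>:") 1 with
    | none => d
    | some rest =>
      -- age_str = comment.split('<age>:')[1].split('<')[0].strip()
      match PySem.Int.ofStr? (PySem.Str.strip ((pvSplit rest "<").headD "")) with
      | some i => d.insert "age" (some (PySem.Int.toStr i))  -- int(age_str), rendered as a string for the Option String value type
      | none => d                                            -- ValueError → except: pass
  else d

def pvSexLine (d : PySem.Dict String (Option String)) (comment : String) :
    PySem.Dict String (Option String) :=
  if PySem.Str.isIn "<sex>:" comment then
    match PySem.List.pyGet? (pvSplit comment "<sex>:") 1 with
    | none => d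
    | some rest =>
      d.insert "sex" (some (PySem.Str.strip ((pvSplit rest "<").headD "")))
  else d

def pvLocLine (d : PySem.Dict String (Option String)) (comment : String) :
    PySem.Dict String (Option String) :=
  if PySem.Str.isIn "<location>:" comment then
    match PySem.List.pyGet? (pvSplit comment "<location>:") 1 with
    | none => d
    | some rest =>
      d.insert "location" (some (PySem.Str.strip ((pvSplit rest "<").headD "")))
  else d

def pvStepA (d : PySem.Dict String (Option String)) (comment : String) :
    PySem.Dict String (Option String) :=
  pvLocLine (pvSexLine (pvAgeLine d comment) comment) comment

def parse_demographics (header_comments : List String) : List (String × Option String) :=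
  (header_comments.foldl pvStepA
    (PySem.Dict.ofList [("age", none), ("sex", none), ("location", none)])).items

-- ===== PORT B =====
-- Source B's `extract(tag, convert)`: fold over all comments, keeping the last value
-- `convert` succeeded on (convert returns none exactly where the Python convert raises).
def pvStepB (tag : String) (conv : String → Option String)
    (result : Option String) (comment : String) : Option String :=
  if PySem.Str.isIn tag comment then
    match PySem.List.pyGet? (pvSplit comment tag) 1 with
    | none => result
    | some rest =>
      match conv (PySem.Str.strip ((pvSplit rest "<").headD "")) with
      | some v => some v
      | none => result
  else result

def pvExtract (header_comments : List String) (tag : String)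
    (conv : String → Option String) : Option String :=
  header_comments.foldl (pvStepB tag conv) none

def parse_demographics_alt (header_comments : List String) : List (String × Option String) :=
  [("age", pvExtract header_comments "<age>:"
      (fun s => (PySem.Int.ofStr? s).map (fun i => PySem.Int.toStr i))),
   ("sex", pvExtract header_comments "<sex>:" (fun s => some s)),
   ("location", pvExtract header_comments "<location>:" (fun s => some s))]

-- ===== PRECONDITION & SPEC =====
def Spec_parse_demographics (header_comments : List String) (out : List (String × Option String)) : Prop := out = parse_demographics_alt header_comments
instance (header_comments : List String) (out : List (String × Option String)) : Decidable (Spec_parse_demographics header_comments out) := by unfold Spec_parse_demographics; infer_instance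

-- ===== CLAIM (what is proved, stated in full; the proofs are below) =====
def Claim_equal_parse_demographics : Prop := ∀ (header_comments : List String), Dom_parse_demographics header_comments → Spec_parse_demographics header_comments (parse_demographics header_comments)

-- ===== LEMMAS AND PROOFS =====

-- One step of A's loop, on a dict of the fixed shape, acts independently on the three
-- fields, each exactly as the corresponding B-side step.
theorem pvAgeLine_mk (a s l : Option String) (c : String) :
    pvAgeLine (PySem.Dict.mk [("age", a), ("sex", s), ("location", l)]) c
      = PySem.Dict.mk
          [("age", pvStepB "<age>:"
              (fun s => (PySem.Int.ofStr? s).map (fun i => PySem.Int.toStr i)) a c),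
           ("sex", s), ("location", l)] := by
  unfold pvAgeLine pvStepB
  cases hb : PySem.Str.isIn "<age>:" c
  · rw [if_neg Bool.false_ne_true, if_neg Bool.false_ne_true]
  · rw [if_pos rfl, if_pos rfl]
    cases ho : PySem.List.pyGet? (pvSplit c "<age>:") 1 with
    | none => rfl
    | some rest =>
      cases hi : PySem.Int.ofStr? (PySem.Str.strip ((pvSplit rest "<").headD "")) with
      | none => simp only [hi, Option.map_none]
      | some i => simp only [hi, Option.map_some]; simp [PySem.Dict.insert, PySem.Dict.contains]

theorem pvSexLine_mk (a s l : Option String) (c : String) :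
    pvSexLine (PySem.Dict.mk [("age", a), ("sex", s), ("location", l)]) c
      = PySem.Dict.mk
          [("age", a), ("sex", pvStepB "<sex>:" (fun s => some s) s c), ("location", l)] := by
  unfold pvSexLine pvStepB
  cases hb : PySem.Str.isIn "<sex>:" c
  · rw [if_neg Bool.false_ne_true, if_neg Bool.false_ne_true]
  · rw [if_pos rfl, if_pos rfl]
    cases ho : PySem.List.pyGet? (pvSplit c "<sex>:") 1 with
    | none => rfl
    | some rest => simp [PySem.Dict.insert, PySem.Dict.contains]

theorem pvLocLine_mk (a s l : Option String) (c : String) :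
    pvLocLine (PySem.Dict.mk [("age", a), ("sex", s), ("location", l)]) c
      = PySem.Dict.mk
          [("age", a), ("sex", s),
           ("location", pvStepB "<location>:" (fun s => some s) l c)] := by
  unfold pvLocLine pvStepB
  cases hb : PySem.Str.isIn "<location>:" c
  · rw [if_neg Bool.false_ne_true, if_neg Bool.false_ne_true]
  · rw [if_pos rfl, if_pos rfl]
    cases ho : PySem.List.pyGet? (pvSplit c "<location>:") 1 with
    | none => rfl
    | some rest => simp [PySem.Dict.insert, PySem.Dict.contains]

theorem pvStepA_mk (a s l : Option String) (c : String) :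
    pvStepA (PySem.Dict.mk [("age", a), ("sex", s), ("location", l)]) c
      = PySem.Dict.mk
          [("age", pvStepB "<age>:"
              (fun s => (PySem.Int.ofStr? s).map (fun i => PySem.Int.toStr i)) a c),
           ("sex", pvStepB "<sex>:" (fun s => some s) s c),
           ("location", pvStepB "<location>:" (fun s => some s) l c)] := by
  simp only [pvStepA, pvAgeLine_mk, pvSexLine_mk, pvLocLine_mk]

theorem pvFoldA_mk (hcs : List String) (a s l : Option String) :
    hcs.foldl pvStepA (PySem.Dict.mk [("age", a), ("sex", s), ("location", l)])
      = PySem.Dict.mk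
          [("age", hcs.foldl (pvStepB "<age>:"
              (fun s => (PySem.Int.ofStr? s).map (fun i => PySem.Int.toStr i))) a),
           ("sex", hcs.foldl (pvStepB "<sex>:" (fun s => some s)) s),
           ("location", hcs.foldl (pvStepB "<location>:" (fun s => some s)) l)] := by
  induction hcs generalizing a s l with
  | nil => rfl
  | cons c cs ih => simp only [List.foldl_cons, pvStepA_mk, ih]

-- ===== VERDICT (by name: the statement is the Claim_ definition above) =====
theorem parse_demographics_spec : Claim_equal_parse_demographics := by
  intro hcs _
  show parse_demographics hcs = parse_demographics_alt hcs
  have h0 : PySem.Dict.ofList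
      ([("age", none), ("sex", none), ("location", none)] : List (String × Option String))
      = PySem.Dict.mk [("age", none), ("sex", none), ("location", none)] := by decide
  simp only [parse_demographics, parse_demographics_alt, h0, pvFoldA_mk, pvExtract]
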